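-- pv_equiv track=rewrite | github.com/kuc161123/S-RAutoBot | backtest_3m_vs_1h.py | find_pivot_highs_no_lookahead
-- ===== SOURCE A (Python) =====
-- def find_pivot_highs_no_lookahead(highs, left=3):
--     pivots = []
--     n = len(highs)
--     for i in range(left, n):
--         is_pivot = all(highs[j] < highs[i] for j in range(i-left, i))
--         if is_pivot:
--             pivots.append((i, highs[i]))
--     return pivots
-- ===== SOURCE B (Python) =====
-- def find_pivot_highs_no_lookahead(highs, left=3):
--     # One pass with a monotonic stack of indices (non-increasing highs):
--     # after popping smaller values, the stack top is the nearest previous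
--     # index j with highs[j] >= highs[i]; i is a pivot iff it is absent or
--     # further back than `left` bars.
--     pivots = []
--     stack = []
--     for i, h in enumerate(highs):
--         while stack and highs[stack[-1]] < h:
--             stack.pop()
--         if i >= left and (not stack or stack[-1] < i - left):
--             pivots.append((i, h))
--         stack.append(i)
--     return pivots
-- ===== Notes on version B (the rewrite author's own statement) =====
-- stated objective: faster
-- what changed: replaces the per-index rescan of the previous `left` bars with a single monotonic-stack pass that tracks the nearest previous bar whose high is >= the current one
-- outside the precondition, e.g. on find_pivot_highs_no_lookahead([5], -1): A returns [(-1, 5), (0, 5)], B returns [(0, 5)]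
import Mathlib
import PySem

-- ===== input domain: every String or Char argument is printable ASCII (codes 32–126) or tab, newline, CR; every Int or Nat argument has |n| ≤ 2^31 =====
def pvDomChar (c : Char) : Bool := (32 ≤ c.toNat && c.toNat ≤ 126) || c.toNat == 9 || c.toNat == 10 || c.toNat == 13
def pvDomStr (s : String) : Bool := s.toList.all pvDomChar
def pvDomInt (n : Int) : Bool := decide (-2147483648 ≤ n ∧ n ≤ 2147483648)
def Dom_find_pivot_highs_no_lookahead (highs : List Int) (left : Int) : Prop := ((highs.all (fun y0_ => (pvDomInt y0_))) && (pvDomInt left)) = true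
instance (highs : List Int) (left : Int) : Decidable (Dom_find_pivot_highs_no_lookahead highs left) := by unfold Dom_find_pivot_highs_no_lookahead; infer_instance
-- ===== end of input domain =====

-- B replaces A's O(n*left) rescan of the previous `left` bars with a single
-- monotonic-stack pass (objective: faster, measured).


-- ===== PORT A =====
def find_pivot_highs_no_lookahead (highs : List Int) (left : Int) : List (Int × Int) :=
  let n : Int := PySem.List.len highs
  (PySem.List.pyRange left n 1).foldl
    (fun pivots i =>
      let is_pivot := (PySem.List.pyRange (i - left) i 1).all
        (fun j => decide (PySem.List.pyGetD highs j 0 < PySem.List.pyGetD highs i 0))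
      if is_pivot then pivots ++ [(i, PySem.List.pyGetD highs i 0)] else pivots)
    []

-- ===== PORT B =====
-- The Python stack's TOP (most recently pushed index) is the HEAD of the Lean
-- list, so Python's pop-while-smaller loop is dropWhile and append is cons.
def find_pivot_highs_no_lookahead_alt (highs : List Int) (left : Int) : List (Int × Int) :=
  ((PySem.List.enumerate highs 0).foldl
    (fun (st : List (Int × Int) × List Int) (ih : Int × Int) =>
      let stack := st.2.dropWhile (fun j => decide (PySem.List.pyGetD highs j 0 < ih.2))
      let pivots :=
        if decide (left ≤ ih.1) &&
           (match stack with
            | [] => true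
            | j :: _ => decide (j < ih.1 - left))
        then st.1 ++ [(ih.1, ih.2)] else st.1
      (pivots, ih.1 :: stack))
    ([], [])).1

-- ===== PRECONDITION & SPEC =====
-- Pre_ excludes negative `left`, outside the function's natural domain: there
-- A either raises IndexError (when left < -len(highs)) or returns accidental
-- negative-index wraparound pivots paired with a negative index, which B does not mimic.
def Pre_find_pivot_highs_no_lookahead (highs : List Int) (left : Int) : Prop := 0 ≤ left
instance (highs : List Int) (left : Int) : Decidable (Pre_find_pivot_highs_no_lookahead highs left) := by unfold Pre_find_pivot_highs_no_lookahead; infer_instance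

def pvWitness_find_pivot_highs_no_lookahead : List Int × Int := ([1, 2, 3, 2, 5], 2)

def Spec_find_pivot_highs_no_lookahead (highs : List Int) (left : Int) (out : List (Int × Int)) : Prop := out = find_pivot_highs_no_lookahead_alt highs left
instance (highs : List Int) (left : Int) (out : List (Int × Int)) : Decidable (Spec_find_pivot_highs_no_lookahead highs left out) := by unfold Spec_find_pivot_highs_no_lookahead; infer_instance

-- ===== CLAIM (what is proved, stated in full; the proofs are below) =====
def Claim_equal_find_pivot_highs_no_lookahead : Prop := ∀ (highs : List Int) (left : Int), Dom_find_pivot_highs_no_lookahead highs left → Pre_find_pivot_highs_no_lookahead highs left → Spec_find_pivot_highs_no_lookahead highs left (find_pivot_highs_no_lookahead highs left)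


-- ===== LEMMAS AND PROOFS =====

-- value read by both ports at (possibly out-of-range) index j, default 0
def pvG (hs : List Int) (j : Int) : Int := PySem.List.pyGetD hs j 0

-- index j is still on the stack after processing indices < k
def pvGood (hs : List Int) (k j : Int) : Bool :=
  (PySem.List.pyRange (j + 1) k 1).all (fun m => decide (pvG hs m ≤ pvG hs j))

-- the stack contents after processing indices < k, newest (largest) first
def pvStk (hs : List Int) (k : Int) : List Int :=
  ((PySem.List.pyRange 0 k 1).filter (pvGood hs k)).reverse

-- A's pivot test at index i
def pvP (hs : List Int) (L i : Int) : Bool :=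
  (PySem.List.pyRange (i - L) i 1).all (fun j => decide (pvG hs j < pvG hs i))

-- A's output restricted to indices < k
def pvAout (hs : List Int) (L k : Int) : List (Int × Int) :=
  ((PySem.List.pyRange L k 1).filter (pvP hs L)).map (fun i => (i, pvG hs i))

theorem pvGood_iff (hs : List Int) (k j : Int) :
    pvGood hs k j = true ↔ ∀ m : Int, j < m → m < k → pvG hs m ≤ pvG hs j := by
  simp [pvGood, PySem.List.mem_pyRange_one]

theorem pvP_iff (hs : List Int) (L i : Int) :
    pvP hs L i = true ↔ ∀ j : Int, i - L ≤ j → j < i → pvG hs j < pvG hs i := by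
  simp [pvP, PySem.List.mem_pyRange_one]

theorem pvStk_mem (hs : List Int) (k j : Int) :
    j ∈ pvStk hs k ↔ 0 ≤ j ∧ j < k ∧ pvGood hs k j = true := by
  simp [pvStk, List.mem_reverse, List.mem_filter, PySem.List.mem_pyRange_one, and_assoc]

theorem pvStk_pairwise_gt (hs : List Int) (k : Int) :
    (pvStk hs k).Pairwise (fun a b => b < a) := by
  unfold pvStk
  exact List.pairwise_reverse.2
    (List.Pairwise.filter _ (PySem.List.pairwise_lt_pyRange_one 0 k))

theorem pvStk_pairwise_le (hs : List Int) (k : Int) :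
    (pvStk hs k).Pairwise (fun a b => pvG hs a ≤ pvG hs b) := by
  refine (pvStk_pairwise_gt hs k).imp_of_mem ?_
  intro a b ha hb hba
  rw [pvStk_mem] at ha hb
  exact (pvGood_iff hs k b).1 hb.2.2 a hba ha.2.1

-- on a list whose values are non-decreasing, dropping the < c prefix is filtering
theorem dropWhile_eq_filter_of_mono (f : Int → Int) (c : Int) :
    ∀ (l : List Int), l.Pairwise (fun a b => f a ≤ f b) →
      l.dropWhile (fun x => decide (f x < c)) = l.filter (fun x => decide (c ≤ f x))
  | [], _ => rfl
  | a :: l, h => by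
    rcases List.pairwise_cons.1 h with ⟨ha, hl⟩
    by_cases hc : f a < c
    · simp only [List.dropWhile_cons, List.filter_cons, hc, decide_true]
      simp only [show ¬ c ≤ f a by omega, decide_false]
      exact dropWhile_eq_filter_of_mono f c l hl
    · simp only [List.dropWhile_cons, List.filter_cons, hc, decide_false,
        show c ≤ f a by omega, decide_true, Bool.false_eq_true, if_false]
      congr 1
      refine (List.filter_eq_self.2 ?_).symm
      intro x hx
      have := ha x hx
      simp; omega

theorem pvGood_succ (hs : List Int) (k j : Int) (hj : j < k) :
    pvGood hs (k + 1) j = (pvGood hs k j && decide (pvG hs k ≤ pvG hs j)) := by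
  unfold pvGood
  rw [PySem.List.pyRange_one_succ_right (by omega)]
  simp [List.all_append]

theorem pvStk_succ (hs : List Int) (k : Int) (hk : 0 ≤ k) :
    pvStk hs (k + 1) =
      k :: (pvStk hs k).filter (fun j => decide (pvG hs k ≤ pvG hs j)) := by
  unfold pvStk
  rw [PySem.List.pyRange_one_succ_right hk]
  rw [List.filter_append, List.reverse_append]
  have hgk : pvGood hs (k + 1) k = true := by
    simp [pvGood, PySem.List.pyRange_one_eq_nil (by omega : k + 1 ≤ k + 1)]
  rw [List.filter_congr (l := PySem.List.pyRange 0 k 1)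
      (q := fun j => pvGood hs k j && decide (pvG hs k ≤ pvG hs j))
      (fun j hj => pvGood_succ hs k j ((PySem.List.mem_pyRange_one.1 hj).2))]
  simp [hgk, List.filter_reverse, List.filter_filter, Bool.and_comm]

-- head of a strictly decreasing list bounds every member
theorem head_max_of_pairwise_gt (l : List Int) (h : l.Pairwise (fun a b => b < a))
    (j x : Int) (hh : l.head? = some j) (hx : x ∈ l) : x ≤ j := by
  cases l with
  | nil => cases hx
  | cons a t =>
    cases hh
    rcases List.mem_cons.1 hx with h' | h'
    · omega
    · exact le_of_lt ((List.pairwise_cons.1 h).1 x h')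

-- if some m < k has value ≥ pvG hs k, some stack element j ≥ m has value ≥ pvG hs k
theorem exists_stack_ge (hs : List Int) (k : Int) :
    ∀ (c : Nat) (m : Int), (k - m).toNat ≤ c → 0 ≤ m → m < k → pvG hs k ≤ pvG hs m →
      ∃ j, m ≤ j ∧ j ∈ pvStk hs k ∧ pvG hs k ≤ pvG hs j := by
  intro c
  induction c with
  | zero => intro m hc h0 hm _; omega
  | succ c ih =>
    intro m hc h0 hm hv
    by_cases hg : pvGood hs k m = true
    · exact ⟨m, le_refl m, (pvStk_mem hs k m).2 ⟨h0, hm, hg⟩, hv⟩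
    · rw [pvGood_iff] at hg
      push_neg at hg
      rcases hg with ⟨m', h1, h2, h3⟩
      rcases ih m' (by omega) (by omega) h2 (by omega) with ⟨j, hj1, hj2, hj3⟩
      exact ⟨j, by omega, hj2, hj3⟩

-- B's head test on the popped stack equals A's pivot test (for 0 ≤ L ≤ k)
theorem head_test_eq_pvP (hs : List Int) (L k : Int) (hk : L ≤ k) :
    (match (pvStk hs k).filter (fun j => decide (pvG hs k ≤ pvG hs j)) with
      | [] => true
      | j :: _ => decide (j < k - L)) = pvP hs L k := by
  set st := (pvStk hs k).filter (fun j => decide (pvG hs k ≤ pvG hs j)) with hst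
  have hmem : ∀ j, j ∈ st ↔ j ∈ pvStk hs k ∧ pvG hs k ≤ pvG hs j := by
    intro j; simp [hst, List.mem_filter]
  by_cases hp : pvP hs L k = true
  · rw [hp]
    cases hste : st with
    | nil => rfl
    | cons j t =>
      have hj : j ∈ st := by rw [hste]; exact List.mem_cons_self
      rcases (hmem j).1 hj with ⟨hjs, hjv⟩
      rcases (pvStk_mem hs k j).1 hjs with ⟨hj0, hjk, _⟩
      have : j < k - L := by
        by_contra hge
        have := (pvP_iff hs L k).1 hp j (by omega) hjk
        omega
      simp [this]
  · have hpf : pvP hs L k = false := by simpa using hp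
    rw [hpf]
    have hex : ∃ m, k - L ≤ m ∧ m < k ∧ pvG hs k ≤ pvG hs m := by
      by_contra hno
      push_neg at hno
      have : pvP hs L k = true :=
        (pvP_iff hs L k).2 (fun j h1 h2 => hno j h1 h2)
      rw [this] at hpf; cases hpf
    rcases hex with ⟨m, hm1, hm2, hm3⟩
    rcases exists_stack_ge hs k (k - m).toNat m (le_refl _) (by omega) hm2 hm3
      with ⟨j, hj1, hj2, hj3⟩
    have hjst : j ∈ st := (hmem j).2 ⟨hj2, hj3⟩
    cases hste : st with
    | nil => rw [hste] at hjst; cases hjst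
    | cons a t =>
      have hpw : st.Pairwise (fun a b => b < a) := List.Pairwise.filter _ (pvStk_pairwise_gt hs k)
      have hja : j ≤ a := head_max_of_pairwise_gt st hpw a j (by rw [hste]; rfl) hjst
      simp only []
      have : ¬ a < k - L := by omega
      simp [this]

theorem pvAout_succ_lt (hs : List Int) (L k : Int) (hk : k < L) :
    pvAout hs L (k + 1) = pvAout hs L k := by
  unfold pvAout
  rw [PySem.List.pyRange_one_eq_nil (by omega : k + 1 ≤ L),
      PySem.List.pyRange_one_eq_nil (by omega : k ≤ L)]

theorem pvAout_succ_ge (hs : List Int) (L k : Int) (hk : L ≤ k) :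
    pvAout hs L (k + 1) =
      pvAout hs L k ++ (if pvP hs L k then [(k, pvG hs k)] else []) := by
  unfold pvAout
  rw [PySem.List.pyRange_one_succ_right hk, List.filter_append, List.map_append]
  by_cases hp : pvP hs L k = true <;> simp [hp]

-- B's fold step, after enumerate is seen as (j, pvG hs j) over pyRange

-- the loop invariant: B's fold over the first k indices produces A's output
-- on indices < k paired with the spec stack
theorem pvInv (hs : List Int) (L : Int) (hL : 0 ≤ L) (c : Nat) :
    (PySem.List.pyRange 0 c 1).foldl
      (fun (st : List (Int × Int) × List Int) (i : Int) =>
        let stack := st.2.dropWhile (fun j => decide (pvG hs j < pvG hs i))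
        let pivots :=
          if decide (L ≤ i) &&
             (match stack with
              | [] => true
              | j :: _ => decide (j < i - L))
          then st.1 ++ [(i, pvG hs i)] else st.1
        (pivots, i :: stack))
      ([], []) = (pvAout hs L c, pvStk hs c) := by
  induction c with
  | zero =>
    simp only [Nat.cast_zero]
    unfold pvAout pvStk
    rw [PySem.List.pyRange_one_eq_nil (le_refl (0 : Int)),
        PySem.List.pyRange_one_eq_nil hL]
    simp
  | succ c ih =>
    have hcast : ((c + 1 : Nat) : Int) = (c : Int) + 1 := by push_cast; ring
    rw [hcast, PySem.List.pyRange_one_succ_right (by positivity), List.foldl_append, ih]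
    simp only [List.foldl_cons, List.foldl_nil]
    have hdrop : (pvStk hs c).dropWhile (fun j => decide (pvG hs j < pvG hs (c : Int))) =
        (pvStk hs c).filter (fun j => decide (pvG hs (c : Int) ≤ pvG hs j)) :=
      dropWhile_eq_filter_of_mono (pvG hs) (pvG hs (c : Int)) _ (pvStk_pairwise_le hs c)
    rw [hdrop]
    by_cases hLc : L ≤ (c : Int)
    · rw [pvAout_succ_ge hs L c hLc, pvStk_succ hs (c : Int) (by positivity),
          head_test_eq_pvP hs L (c : Int) hLc]
      by_cases hp : pvP hs L (c : Int) = true <;> simp [hp, hLc]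
    · rw [pvAout_succ_lt hs L c (by omega), pvStk_succ hs (c : Int) (by positivity)]
      simp [hLc]

-- ===== VERDICT (by name: the statement is the Claim_ definition above) =====
theorem find_pivot_highs_no_lookahead_spec : Claim_equal_find_pivot_highs_no_lookahead := by
  intro highs left _ hpre
  unfold Spec_find_pivot_highs_no_lookahead
  unfold find_pivot_highs_no_lookahead find_pivot_highs_no_lookahead_alt
  rw [PySem.List.enumerate_eq_map_pyRange (d := 0), List.foldl_map]
  have hB := pvInv highs left hpre highs.length
  simp only [pvG] at hB
  dsimp only at hB ⊢
  simp only [PySem.List.len_eq] at hB ⊢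
  rw [PySem.List.foldl_append_if
    (p := fun i => (PySem.List.pyRange (i - left) i 1).all
        (fun j => decide (PySem.List.pyGetD highs j 0 < PySem.List.pyGetD highs i 0)))
    (f := fun i => (i, PySem.List.pyGetD highs i 0))]
  exact (congrArg Prod.fst hB).symm
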